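-- pv_equiv track=rewrite | github.com/ffiedler-aba/ti-monitoring | scripts/update_apprise_services.py | get_service_priority
-- ===== SOURCE A (Python) =====
-- def get_service_priority(service_name):
--     """Determine service priority"""
--     service_lower = service_name.lower()
--
--     # High priority services (most popular)
--     high_priority = ['slack', 'teams', 'telegram', 'discord', 'email', 'gmail', 'outlook', 'pushover']
--
--     # Medium priority services
--     medium_priority = ['whatsapp', 'signal', 'matrix', 'mattermost', 'rocket', 'pushbullet', 'gotify', 'ntfy', 'twilio', 'aws_ses', 'sendgrid', 'mailgun', 'resend', 'pagerduty', 'opsgenie']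
--
--     if any(x in service_lower for x in high_priority):
--         return 1
--     elif any(x in service_lower for x in medium_priority):
--         return 2
--     else:
--         return 3
-- ===== SOURCE B (Python) =====
-- def get_service_priority(service_name):
--     """Determine service priority"""
--     tiers = {
--         'slack': 1, 'teams': 1, 'telegram': 1, 'discord': 1,
--         'email': 1, 'gmail': 1, 'outlook': 1, 'pushover': 1,
--         'whatsapp': 2, 'signal': 2, 'matrix': 2, 'mattermost': 2,
--         'rocket': 2, 'pushbullet': 2, 'gotify': 2, 'ntfy': 2,
--         'twilio': 2, 'aws_ses': 2, 'sendgrid': 2, 'mailgun': 2,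
--         'resend': 2, 'pagerduty': 2, 'opsgenie': 2,
--     }
--     lengths = sorted({len(k) for k in tiers})
--     s = service_name.lower()
--     best = 3
--     for i in range(len(s)):
--         for L in lengths:
--             t = tiers.get(s[i:i + L])
--             if t is not None and t < best:
--                 best = t
--     return best
-- ===== Notes on version B (the rewrite author's own statement) =====
-- stated objective: alternative
-- what changed: B inverts the search direction: instead of scanning the keyword lists and testing each keyword for substring membership, it slides over every start position of the lowered name, looks each candidate window (one per distinct keyword length) up in a keyword-to-tier hash map, and keeps the minimum tier found, defaulting to 3.
import Mathlib
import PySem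

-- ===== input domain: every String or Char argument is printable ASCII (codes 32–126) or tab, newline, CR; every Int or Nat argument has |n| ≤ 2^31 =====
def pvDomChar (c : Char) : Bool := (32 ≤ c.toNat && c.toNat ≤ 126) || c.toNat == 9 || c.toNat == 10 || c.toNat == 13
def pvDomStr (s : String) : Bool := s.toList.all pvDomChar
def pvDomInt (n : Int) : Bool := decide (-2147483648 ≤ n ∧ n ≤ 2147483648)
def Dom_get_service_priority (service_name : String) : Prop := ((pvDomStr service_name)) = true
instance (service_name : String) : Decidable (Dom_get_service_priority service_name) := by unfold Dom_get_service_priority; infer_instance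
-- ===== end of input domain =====

-- B inverts the search: it slides over the positions of the lowered name and looks candidate
-- windows (one per distinct keyword length) up in a keyword→tier map, keeping the minimum tier.

-- ===== PORT A =====
def gspHigh : List String := ["slack", "teams", "telegram", "discord", "email", "gmail", "outlook", "pushover"]
def gspMedium : List String := ["whatsapp", "signal", "matrix", "mattermost", "rocket", "pushbullet", "gotify", "ntfy", "twilio", "aws_ses", "sendgrid", "mailgun", "resend", "pagerduty", "opsgenie"]

def get_service_priority (service_name : String) : Int :=
  let service_lower := PySem.Str.lower service_name
  if gspHigh.any (fun x => PySem.Str.isIn x service_lower) then 1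
  else if gspMedium.any (fun x => PySem.Str.isIn x service_lower) then 2
  else 3

-- ===== PORT B =====
def gspTiers : PySem.Dict String Int := PySem.Dict.ofList
  [("slack", 1), ("teams", 1), ("telegram", 1), ("discord", 1),
   ("email", 1), ("gmail", 1), ("outlook", 1), ("pushover", 1),
   ("whatsapp", 2), ("signal", 2), ("matrix", 2), ("mattermost", 2),
   ("rocket", 2), ("pushbullet", 2), ("gotify", 2), ("ntfy", 2),
   ("twilio", 2), ("aws_ses", 2), ("sendgrid", 2), ("mailgun", 2),
   ("resend", 2), ("pagerduty", 2), ("opsgenie", 2)]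

def get_service_priority_alt (service_name : String) : Int :=
  let lengths : List Int := PySem.List.sorted (PySem.Set.ofList (gspTiers.keys.map PySem.Str.len)) (fun x => x) false
  let s := PySem.Str.lower service_name
  (PySem.List.pyRange 0 (PySem.Str.len s) 1).foldl (fun best i =>
    lengths.foldl (fun best L =>
      match gspTiers.get? (PySem.Str.slice s (some i) (some (i + L))) with
      | some t => if t < best then t else best
      | none => best) best) 3

-- ===== PRECONDITION & SPEC =====
def Spec_get_service_priority (service_name : String) (out : Int) : Prop := out = get_service_priority_alt service_name
instance (service_name : String) (out : Int) : Decidable (Spec_get_service_priority service_name out) := by unfold Spec_get_service_priority; infer_instance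

-- ===== CLAIM =====
def Claim_equal_get_service_priority : Prop := ∀ (service_name : String), Dom_get_service_priority service_name → Spec_get_service_priority service_name (get_service_priority service_name)

-- ===== LEMMAS AND PROOFS =====

def gspLengths : List Int := [4, 5, 6, 7, 8, 9, 10]

lemma gsp_lengths_eq :
    PySem.List.sorted (PySem.Set.ofList (gspTiers.keys.map PySem.Str.len)) (fun x => x) false = gspLengths := by
  decide

lemma gsp_keys : gspTiers.keys = gspHigh ++ gspMedium := by decide

-- characterisation of the tier map: lookup = membership in the high / medium lists
set_option maxHeartbeats 1000000 in
lemma gsp_get?_eq (k : String) :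
    gspTiers.get? k = if k ∈ gspHigh then some 1 else if k ∈ gspMedium then some 2 else none := by
  by_cases h1 : k ∈ gspHigh
  · rw [if_pos h1]
    simp only [gspHigh, List.mem_cons, List.not_mem_nil, or_false] at h1
    rcases h1 with h | h | h | h | h | h | h | h <;> subst h <;> decide
  · by_cases h2 : k ∈ gspMedium
    · rw [if_neg h1, if_pos h2]
      simp only [gspMedium, List.mem_cons, List.not_mem_nil, or_false] at h2
      rcases h2 with h | h | h | h | h | h | h | h | h | h | h | h | h | h | h <;> subst h <;> decide
    · rw [if_neg h1, if_neg h2, PySem.Dict.get?_eq_none_iff_not_mem_keys, gsp_keys]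
      simp only [List.mem_append]
      tauto

lemma gsp_disjoint : ∀ k ∈ gspHigh, k ∉ gspMedium := by decide

lemma gsp_get?_one (k : String) : gspTiers.get? k = some 1 ↔ k ∈ gspHigh := by
  rw [gsp_get?_eq]
  split_ifs <;> simp_all

lemma gsp_get?_two (k : String) : gspTiers.get? k = some 2 ↔ k ∈ gspMedium := by
  rw [gsp_get?_eq]
  split_ifs with h1 h2
  · simp only [Option.some.injEq]
    exact iff_of_false (by omega) (gsp_disjoint k h1)
  · simp [h2]
  · simp [h2]

-- one running-minimum pass over options valued in {1, 2}
lemma gsp_minFold {α : Type} (g : α → Option Int) (xs : List α) (b : Int)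
    (hg : ∀ x ∈ xs, g x = none ∨ g x = some 1 ∨ g x = some 2) :
    xs.foldl (fun best x => match g x with
      | some t => if t < best then t else best
      | none => best) b
    = if ∃ x ∈ xs, g x = some 1 then min b 1
      else if ∃ x ∈ xs, g x = some 2 then min b 2 else b := by
  induction xs generalizing b with
  | nil => simp
  | cons x rest ih =>
    have hrest : ∀ y ∈ rest, g y = none ∨ g y = some 1 ∨ g y = some 2 :=
      fun y hy => hg y (List.mem_cons_of_mem _ hy)
    rcases hg x (List.mem_cons_self) with h | h | h <;>
      simp only [List.foldl_cons, h, ih _ hrest, List.mem_cons, exists_eq_or_imp,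
        reduceCtorEq, Option.some.injEq, false_or, OfNat.ofNat_ne_one, true_or] <;>
      norm_num <;>
      split_ifs <;> omega

-- outer running-minimum pass over positions, with the two window conditions
lemma gsp_outer (s : String) (xs : List Int) (b : Int) :
    xs.foldl (fun best i =>
      if ∃ L ∈ gspLengths, gspTiers.get? (PySem.Str.slice s (some i) (some (i + L))) = some 1 then min best 1
      else if ∃ L ∈ gspLengths, gspTiers.get? (PySem.Str.slice s (some i) (some (i + L))) = some 2 then min best 2
      else best) b
    = if ∃ i ∈ xs, ∃ L ∈ gspLengths, gspTiers.get? (PySem.Str.slice s (some i) (some (i + L))) = some 1 then min b 1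
      else if ∃ i ∈ xs, ∃ L ∈ gspLengths, gspTiers.get? (PySem.Str.slice s (some i) (some (i + L))) = some 2 then min b 2
      else b := by
  induction xs generalizing b with
  | nil => simp
  | cons x rest ih =>
    simp only [List.foldl_cons, List.mem_cons, exists_eq_or_imp, ih]
    by_cases hp : ∃ L ∈ gspLengths, gspTiers.get? (PySem.Str.slice s (some x) (some (x + L))) = some 1 <;>
      by_cases hq : ∃ L ∈ gspLengths, gspTiers.get? (PySem.Str.slice s (some x) (some (x + L))) = some 2 <;>
      simp only [hp, hq, if_true, if_false, true_or, false_or] <;>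
      split_ifs <;> omega

-- position scan finds a tier-j window somewhere ↔ some keyword of that tier's list is a substring
lemma gsp_key_iff (s : String) (j : Int) (lst : List String)
    (hget : ∀ k, gspTiers.get? k = some j ↔ k ∈ lst)
    (hlen : ∀ kw ∈ lst, kw.toList ≠ [] ∧ ((kw.toList.length : Int)) ∈ gspLengths) :
    (∃ i ∈ PySem.List.pyRange 0 (PySem.Str.len s) 1,
      ∃ L ∈ gspLengths, gspTiers.get? (PySem.Str.slice s (some i) (some (i + L))) = some j)
    ↔ ∃ kw ∈ lst, PySem.Str.isIn kw s = true := by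
  constructor
  · rintro ⟨i, hi, L, hL, hg⟩
    refine ⟨_, (hget _).1 hg, ?_⟩
    rw [PySem.Str.isIn_iff_infix, PySem.Str.toList_slice, PySem.Chars.slice_eq_listSlice]
    have h0i : 0 ≤ i := (PySem.List.mem_pyRange_one.1 hi).1
    have h0L : 0 ≤ L := by
      simp only [gspLengths, List.mem_cons, List.not_mem_nil, or_false] at hL
      rcases hL with h | h | h | h | h | h | h <;> omega
    rw [PySem.List.slice_toNat _ h0i (by omega)]
    exact ((List.take_prefix _ _).isInfix).trans ((List.drop_suffix _ _).isInfix)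
  · rintro ⟨kw, hkw, hin⟩
    obtain ⟨hne, hmem⟩ := hlen kw hkw
    rw [PySem.Str.isIn_iff_infix, ← PySem.Chars.isIn_iff_infix,
      ← PySem.Chars.exists_prefix_drop_iff_isIn] at hin
    obtain ⟨p, hp⟩ := hin
    have hplt : p < s.toList.length := by
      by_contra hge
      rw [List.drop_eq_nil_of_le (by omega)] at hp
      exact hne (List.prefix_nil.1 hp)
    refine ⟨(p : Int), PySem.List.mem_pyRange_one.2 ⟨by positivity, by rw [PySem.Str.len_eq]; exact_mod_cast hplt⟩,
      (kw.toList.length : Int), hmem, (hget _).2 ?_⟩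
    have hsl : PySem.Str.slice s (some (p : Int)) (some ((p : Int) + (kw.toList.length : Int))) = kw := by
      rw [← String.toList_inj, PySem.Str.toList_slice, PySem.Chars.slice_eq_listSlice,
        PySem.List.slice_natCast_add]
      exact (List.prefix_iff_eq_take.1 hp).symm
    rwa [hsl]

lemma gsp_high_len : ∀ kw ∈ gspHigh, kw.toList ≠ [] ∧ ((kw.toList.length : Int)) ∈ gspLengths := by decide

lemma gsp_medium_len : ∀ kw ∈ gspMedium, kw.toList ≠ [] ∧ ((kw.toList.length : Int)) ∈ gspLengths := by decide

-- the whole scan, characterised by the two substring conditions of A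
lemma gsp_alt_eq (service_name : String) :
    get_service_priority_alt service_name =
    (if ∃ kw ∈ gspHigh, PySem.Str.isIn kw (PySem.Str.lower service_name) = true then 1
     else if ∃ kw ∈ gspMedium, PySem.Str.isIn kw (PySem.Str.lower service_name) = true then 2
     else 3) := by
  unfold get_service_priority_alt
  simp only [gsp_lengths_eq]
  set s := PySem.Str.lower service_name with hs
  rw [List.foldl_ext _
    (fun (best i : Int) =>
      if ∃ L ∈ gspLengths, gspTiers.get? (PySem.Str.slice s (some i) (some (i + L))) = some 1 then min best 1
      else if ∃ L ∈ gspLengths, gspTiers.get? (PySem.Str.slice s (some i) (some (i + L))) = some 2 then min best 2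
      else best) 3
    (fun best i _ => by
      rw [gsp_minFold (fun L => gspTiers.get? (PySem.Str.slice s (some i) (some (i + L))))
        gspLengths best (fun L _ => by dsimp only; rw [gsp_get?_eq]; split_ifs <;> simp)]),
    gsp_outer s _ 3]
  simp only [gsp_key_iff s 1 gspHigh gsp_get?_one gsp_high_len,
    gsp_key_iff s 2 gspMedium gsp_get?_two gsp_medium_len]
  split_ifs <;> norm_num

-- ===== VERDICT =====
theorem get_service_priority_spec : Claim_equal_get_service_priority := by
  intro service_name _
  unfold Spec_get_service_priority
  rw [gsp_alt_eq]
  unfold get_service_priority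
  simp only [List.any_eq_true]
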